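-- pv_equiv track=rewrite | github.com/falconizmi/extended-tasks | 03/r2_rectangles.py | filter_overlapping
-- ===== SOURCE A (Python) =====
-- def has_overlap(a, b):
--     a1, a2 = a
--     a1_x, a1_y = a1
--     a2_x, a2_y = a2
--
--     b1, b2 = b
--     b1_x, b1_y = b1
--     b2_x, b2_y = b2
--
--     x_pos = (a1_x <= b1_x and b1_x <= a2_x or
--              a1_x <= b2_x and b2_x <= a2_x )
--
--     y_pos = (a1_y <= b1_y and b1_y <= a2_y or
--              a1_y <= b2_y and b2_y <= a2_y)
--
--     return x_pos and y_pos
--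
-- def filter_overlapping(rectangles):
--     result = []
--     for i, r1 in enumerate(rectangles):
--         for j, r2 in enumerate(rectangles):
--             if i != j and has_overlap(r1, r2):
--                 result.append(r1)
--                 break
--     return result
-- ===== SOURCE B (Python) =====
-- def filter_overlapping(rectangles):
--     # Reduction: r1 overlaps r2 (in A's sense) iff one of r2's four corner
--     # points lies inside r1.  Build the tagged corner-point list once, then
--     # keep each rectangle that contains a corner of another rectangle.
--     corners = []
--     for idx, ((x1, y1), (x2, y2)) in enumerate(rectangles):
--         corners.extend([(idx, x1, y1), (idx, x1, y2), (idx, x2, y1), (idx, x2, y2)])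
--     out = []
--     for i, ((ax1, ay1), (ax2, ay2)) in enumerate(rectangles):
--         if any(j != i and ax1 <= px <= ax2 and ay1 <= py <= ay2
--                for (j, px, py) in corners):
--             out.append(((ax1, ay1), (ax2, ay2)))
--     return out
-- ===== Notes on version B (the rewrite author's own statement) =====
-- stated objective: alternative
-- what changed: B replaces A's per-pair compound overlap predicate with a reduction to point containment: it builds one tagged list of all rectangles' corner points and keeps a rectangle iff it contains a corner point tagged with another index.
import Mathlib
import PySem

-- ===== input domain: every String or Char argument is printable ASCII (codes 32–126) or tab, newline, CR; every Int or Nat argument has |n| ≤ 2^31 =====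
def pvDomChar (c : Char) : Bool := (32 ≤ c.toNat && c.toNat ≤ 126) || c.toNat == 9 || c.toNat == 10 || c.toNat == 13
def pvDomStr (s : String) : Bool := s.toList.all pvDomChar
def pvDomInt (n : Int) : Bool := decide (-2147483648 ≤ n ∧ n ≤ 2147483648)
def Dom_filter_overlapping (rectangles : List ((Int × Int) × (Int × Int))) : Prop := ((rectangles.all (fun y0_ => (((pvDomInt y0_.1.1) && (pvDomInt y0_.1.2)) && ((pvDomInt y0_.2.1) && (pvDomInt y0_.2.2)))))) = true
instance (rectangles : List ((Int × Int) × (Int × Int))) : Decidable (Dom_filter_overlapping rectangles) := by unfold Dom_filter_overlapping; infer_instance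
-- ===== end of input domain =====

-- B replaces A's compound per-pair overlap test by a reduction to corner-point
-- containment over a tagged corner list built once (objective: alternative, same O(n^2) cost).


-- ===== PORT A =====
def has_overlap (a b : (Int × Int) × (Int × Int)) : Bool :=
  let x_pos := (a.1.1 ≤ b.1.1 && b.1.1 ≤ a.2.1) || (a.1.1 ≤ b.2.1 && b.2.1 ≤ a.2.1)
  let y_pos := (a.1.2 ≤ b.1.2 && b.1.2 ≤ a.2.2) || (a.1.2 ≤ b.2.2 && b.2.2 ≤ a.2.2)
  x_pos && y_pos

-- inner 'for j, r2 … break' loop of A: scans until the first j ≠ i with overlap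
def innerLoopA (i : Int) (r1 : (Int × Int) × (Int × Int)) :
    List (Int × ((Int × Int) × (Int × Int))) → Bool
  | [] => false
  | (j, r2) :: rest =>
    if decide (i ≠ j) && has_overlap r1 r2 then true else innerLoopA i r1 rest

def filter_overlapping (rectangles : List ((Int × Int) × (Int × Int))) : List ((Int × Int) × (Int × Int)) :=
  (PySem.List.enumerate rectangles).foldl
    (fun result p =>
      if innerLoopA p.1 p.2 (PySem.List.enumerate rectangles) then result ++ [p.2] else result)
    []

-- ===== PORT B =====
def cornersB (rectangles : List ((Int × Int) × (Int × Int))) : List (Int × Int × Int) :=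
  (PySem.List.enumerate rectangles).foldl
    (fun acc p =>
      acc ++ [(p.1, p.2.1.1, p.2.1.2), (p.1, p.2.1.1, p.2.2.2),
              (p.1, p.2.2.1, p.2.1.2), (p.1, p.2.2.1, p.2.2.2)])
    []

def filter_overlapping_alt (rectangles : List ((Int × Int) × (Int × Int))) : List ((Int × Int) × (Int × Int)) :=
  let corners := cornersB rectangles
  (PySem.List.enumerate rectangles).foldl
    (fun out p =>
      if corners.any (fun c =>
          decide (c.1 ≠ p.1) && (p.2.1.1 ≤ c.2.1 && c.2.1 ≤ p.2.2.1)
            && (p.2.1.2 ≤ c.2.2 && c.2.2 ≤ p.2.2.2))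
      then out ++ [p.2] else out)
    []

-- ===== PRECONDITION & SPEC =====
def Spec_filter_overlapping (rectangles : List ((Int × Int) × (Int × Int))) (out : List ((Int × Int) × (Int × Int))) : Prop := out = filter_overlapping_alt rectangles
instance (rectangles : List ((Int × Int) × (Int × Int))) (out : List ((Int × Int) × (Int × Int))) : Decidable (Spec_filter_overlapping rectangles out) := by unfold Spec_filter_overlapping; infer_instance

-- ===== CLAIM (what is proved, stated in full; the proofs are below) =====
def Claim_equal_filter_overlapping : Prop := ∀ (rectangles : List ((Int × Int) × (Int × Int))), Dom_filter_overlapping rectangles → Spec_filter_overlapping rectangles (filter_overlapping rectangles)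

-- ===== LEMMAS AND PROOFS =====

-- A's inner break-loop is an 'any' over the enumerated list
theorem innerLoopA_eq_any (i : Int) (r1 : (Int × Int) × (Int × Int))
    (l : List (Int × ((Int × Int) × (Int × Int)))) :
    innerLoopA i r1 l = l.any (fun q => decide (i ≠ q.1) && has_overlap r1 q.2) := by
  induction l with
  | nil => rfl
  | cons hd tl ih =>
    simp only [innerLoopA, List.any_cons, ← ih]
    cases h : (decide (i ≠ hd.1) && has_overlap r1 hd.2) <;> simp_all

-- B's corner list is the flatMap of the four tagged corners
theorem cornersB_eq_flatMap (rectangles : List ((Int × Int) × (Int × Int))) :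
    cornersB rectangles = (PySem.List.enumerate rectangles).flatMap
      (fun p => [(p.1, p.2.1.1, p.2.1.2), (p.1, p.2.1.1, p.2.2.2),
                 (p.1, p.2.2.1, p.2.1.2), (p.1, p.2.2.1, p.2.2.2)]) := by
  unfold cornersB
  rw [PySem.List.foldl_append_eq_flatMap]
  simp

-- core reduction: A's overlap test = 'some corner of r2 lies inside r1'
theorem overlap_eq_corners (r1 r2 : (Int × Int) × (Int × Int)) :
    has_overlap r1 r2 =
      (((r1.1.1 ≤ r2.1.1 && r2.1.1 ≤ r1.2.1) && (r1.1.2 ≤ r2.1.2 && r2.1.2 ≤ r1.2.2))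
      || ((r1.1.1 ≤ r2.1.1 && r2.1.1 ≤ r1.2.1) && (r1.1.2 ≤ r2.2.2 && r2.2.2 ≤ r1.2.2))
      || ((r1.1.1 ≤ r2.2.1 && r2.2.1 ≤ r1.2.1) && (r1.1.2 ≤ r2.1.2 && r2.1.2 ≤ r1.2.2))
      || ((r1.1.1 ≤ r2.2.1 && r2.2.1 ≤ r1.2.1) && (r1.1.2 ≤ r2.2.2 && r2.2.2 ≤ r1.2.2))) := by
  simp only [has_overlap]
  cases (r1.1.1 ≤ r2.1.1 && r2.1.1 ≤ r1.2.1) <;>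
    cases (r1.1.1 ≤ r2.2.1 && r2.2.1 ≤ r1.2.1) <;>
    cases (r1.1.2 ≤ r2.1.2 && r2.1.2 ≤ r1.2.2) <;>
    cases (r1.1.2 ≤ r2.2.2 && r2.2.2 ≤ r1.2.2) <;> rfl

-- the two per-rectangle conditions coincide
theorem cond_eq (rectangles : List ((Int × Int) × (Int × Int)))
    (p : Int × ((Int × Int) × (Int × Int))) :
    innerLoopA p.1 p.2 (PySem.List.enumerate rectangles) =
      (cornersB rectangles).any (fun c =>
        decide (c.1 ≠ p.1) && (p.2.1.1 ≤ c.2.1 && c.2.1 ≤ p.2.2.1)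
          && (p.2.1.2 ≤ c.2.2 && c.2.2 ≤ p.2.2.2)) := by
  rw [innerLoopA_eq_any, cornersB_eq_flatMap, List.any_flatMap]
  congr 1
  funext q
  rw [overlap_eq_corners]
  simp only [List.any_cons, List.any_nil, Bool.or_false]
  have hne : (decide (p.1 ≠ q.1)) = (decide (q.1 ≠ p.1)) := by
    simp [ne_comm]
  rw [hne]
  cases decide (q.1 ≠ p.1) <;>
    cases (p.2.1.1 ≤ q.2.1.1 && q.2.1.1 ≤ p.2.2.1) <;>
    cases (p.2.1.1 ≤ q.2.2.1 && q.2.2.1 ≤ p.2.2.1) <;>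
    cases (p.2.1.2 ≤ q.2.1.2 && q.2.1.2 ≤ p.2.2.2) <;>
    cases (p.2.1.2 ≤ q.2.2.2 && q.2.2.2 ≤ p.2.2.2) <;> rfl

-- ===== VERDICT (by name: the statement is the Claim_ definition above) =====
theorem filter_overlapping_spec : Claim_equal_filter_overlapping := by
  intro rectangles _
  unfold Spec_filter_overlapping
  simp only [filter_overlapping, filter_overlapping_alt]
  refine PySem.List.foldl_congr_mem (l := PySem.List.enumerate rectangles) (f := ?_) (g := ?_) (init := []) (fun acc p _ => ?_)
  rw [cond_eq rectangles p]
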